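-- pv_equiv track=rewrite | github.com/jvarg122/Linear-Time-Construction-of-Suffix-Arrays | suffix_array.py | less
-- ===== SOURCE A (Python) =====
-- def safe_idx(x, i):
--     return 0 if i >= len(x) else x[i]
--
-- def less(x, i, j, ISA):
--     a, b = safe_idx(x, i), safe_idx(x, j)
--     if a < b:
--         return True
--     if a > b:
--         return False
--     if i % 3 != 0 and j % 3 != 0:
--         return ISA[i] < ISA[j]
--     return less(x, i + 1, j + 1, ISA)
-- ===== SOURCE B (Python) =====
-- def less(x, i, j, ISA):
--     # Closed-form DC3 comparator: the mod-3 rule means the rank branch fires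
--     # after a fixed offset T in {0,1,2} computed from (i%3, j%3) alone, so we
--     # compare the length-T padded prefixes lexicographically and then the ranks.
--     ri, rj = i % 3, j % 3
--     if ri and rj:
--         T = 0
--     elif ri == 2 or rj == 2:
--         T = 2
--     else:
--         T = 1
--     n = len(x)
--     pa = tuple(x[k] if k < n else 0 for k in range(i, i + T + 1))
--     pb = tuple(x[k] if k < n else 0 for k in range(j, j + T + 1))
--     if pa != pb:
--         return pa < pb
--     return ISA[i + T] < ISA[j + T]
-- ===== Notes on version B (the rewrite author's own statement) =====
-- stated objective: alternative
-- what changed: Replaces A's offset-advancing recursion by a closed-form computation of the rank-branch offset T from (i%3, j%3), one lexicographic comparison of the two zero-padded length-(T+1) prefixes, and one rank comparison.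
import Mathlib
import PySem

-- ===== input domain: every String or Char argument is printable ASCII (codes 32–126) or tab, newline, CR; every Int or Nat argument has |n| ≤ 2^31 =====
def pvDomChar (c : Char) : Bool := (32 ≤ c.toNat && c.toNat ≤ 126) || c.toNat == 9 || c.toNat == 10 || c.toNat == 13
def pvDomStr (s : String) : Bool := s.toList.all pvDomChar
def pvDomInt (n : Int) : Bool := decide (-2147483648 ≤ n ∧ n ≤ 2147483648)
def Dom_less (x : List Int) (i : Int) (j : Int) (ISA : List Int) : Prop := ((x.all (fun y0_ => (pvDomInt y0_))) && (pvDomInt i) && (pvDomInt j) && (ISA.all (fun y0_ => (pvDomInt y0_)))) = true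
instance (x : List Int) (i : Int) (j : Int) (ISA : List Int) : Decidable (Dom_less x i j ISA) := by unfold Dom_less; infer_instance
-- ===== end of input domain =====

-- B replaces A's offset-advancing recursion by a closed-form computation of the
-- recursion depth T from (i % 3, j % 3) followed by one lexicographic prefix
-- comparison and one rank comparison (objective: alternative decomposition).

-- ===== PORT A =====
-- safe_idx(x, i): 0 if i >= len(x) else x[i]; the getD 0 default is reached only
-- where Python raises IndexError (negative out-of-range i), which Pre_ excludes.
def safeIdx (x : List Int) (i : Int) : Int :=
  if i ≥ (x.length : Int) then 0 else (PySem.List.pyGet? x i).getD 0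

-- A's recursion, with fuel as a totality guard only: under Pre_less the mod-3
-- branch fires after at most two recursive calls, so fuel 3 is never exhausted.
def lessA : Nat → List Int → Int → Int → List Int → Bool
  | 0, _, _, _, _ => false
  | (f+1), x, i, j, ISA =>
    let a := safeIdx x i
    let b := safeIdx x j
    if a < b then true
    else if a > b then false
    else if PySem.Int.mod i 3 ≠ 0 ∧ PySem.Int.mod j 3 ≠ 0 then
      decide ((PySem.List.pyGet? ISA i).getD 0 < (PySem.List.pyGet? ISA j).getD 0)
    else lessA f x (i+1) (j+1) ISA

def less (x : List Int) (i : Int) (j : Int) (ISA : List Int) : Bool :=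
  lessA 3 x i j ISA

-- ===== PORT B =====
-- offset at which the rank branch fires, from the residues alone
def offsetT (i j : Int) : Int :=
  if PySem.Int.mod i 3 ≠ 0 ∧ PySem.Int.mod j 3 ≠ 0 then 0
  else if PySem.Int.mod i 3 = 2 ∨ PySem.Int.mod j 3 = 2 then 2
  else 1

-- x[k] if k < n else 0 (the getD 0 default is reached only outside Pre_less)
def padAt (x : List Int) (k : Int) : Int :=
  if k < (x.length : Int) then (PySem.List.pyGet? x k).getD 0 else 0

-- Python tuple '<' on equal-length integer tuples (hand port; exact there)
def lexLt : List Int → List Int → Bool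
  | [], [] => false
  | [], _ :: _ => true
  | _ :: _, [] => false
  | a :: as, b :: bs => if a < b then true else if b < a then false else lexLt as bs

def less_alt (x : List Int) (i : Int) (j : Int) (ISA : List Int) : Bool :=
  let T := offsetT i j
  let pa := (List.range (T.toNat + 1)).map (fun t => padAt x (i + (t : Int)))
  let pb := (List.range (T.toNat + 1)).map (fun t => padAt x (j + (t : Int)))
  if pa ≠ pb then lexLt pa pb
  else decide ((PySem.List.pyGet? ISA (i + T)).getD 0 < (PySem.List.pyGet? ISA (j + T)).getD 0)

-- ===== PRECONDITION & SPEC =====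
-- Pre_ is exactly the set of inputs on which Python A returns (no IndexError):
-- i, j not below -len(x) (else x[i]/x[j] raises inside safe_idx), and either a
-- deciding character difference occurs within the offset window 0..T (A returns
-- before touching ISA) or both rank lookups ISA[i+T], ISA[j+T] are in range.
def Pre_less (x : List Int) (i : Int) (j : Int) (ISA : List Int) : Prop :=
  -(x.length : Int) ≤ i ∧ -(x.length : Int) ≤ j ∧
  ((padAt x i ≠ padAt x j ∨
    (1 ≤ offsetT i j ∧ padAt x (i + 1) ≠ padAt x (j + 1)) ∨
    (offsetT i j = 2 ∧ padAt x (i + 2) ≠ padAt x (j + 2))) ∨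
   (PySem.Raise.InRange ISA.length (i + offsetT i j) ∧
    PySem.Raise.InRange ISA.length (j + offsetT i j)))
instance (x : List Int) (i : Int) (j : Int) (ISA : List Int) : Decidable (Pre_less x i j ISA) := by
  unfold Pre_less; infer_instance

def pvWitness_less : List Int × Int × Int × List Int := ([2, 1, 1, 2, 0], 1, 4, [3, 1, 4, 0, 2])

def Spec_less (x : List Int) (i : Int) (j : Int) (ISA : List Int) (out : Bool) : Prop := out = less_alt x i j ISA
instance (x : List Int) (i : Int) (j : Int) (ISA : List Int) (out : Bool) : Decidable (Spec_less x i j ISA out) := by unfold Spec_less; infer_instance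

-- ===== CLAIM (what is proved, stated in full; the proofs are below) =====
def Claim_equal_less : Prop := ∀ (x : List Int) (i : Int) (j : Int) (ISA : List Int), Dom_less x i j ISA → Pre_less x i j ISA → Spec_less x i j ISA (less x i j ISA)

-- ===== LEMMAS AND PROOFS =====

-- lexicographic comparison fused with the fallback r (proof-side helper)
def lexCmp : List Int → List Int → Bool → Bool
  | [], [], r => r
  | [], _ :: _, _ => true
  | _ :: _, [], _ => false
  | a :: as, b :: bs, r => if a < b then true else if a > b then false else lexCmp as bs r

theorem padAt_eq_safeIdx (x : List Int) (k : Int) : padAt x k = safeIdx x k := by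
  unfold padAt safeIdx
  rcases lt_or_ge k (x.length : Int) with h | h
  · simp [h, not_le.mpr h]
  · simp [h, not_lt.mpr h]

theorem mod3 (i : Int) : PySem.Int.mod i 3 = i % 3 :=
  PySem.Int.mod_eq_emod_of_pos (by norm_num)

theorem lexLt_ne (as : List Int) (bs : List Int) (r : Bool) (h : as.length = bs.length) :
    (if as ≠ bs then lexLt as bs else r) = lexCmp as bs r := by
  induction as generalizing bs r with
  | nil =>
    cases bs with
    | nil => simp [lexCmp]
    | cons b bs => simp at h
  | cons a as ih =>
    cases bs with
    | nil => simp at h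
    | cons b bs =>
      simp only [List.length_cons, Nat.add_right_cancel_iff] at h
      rcases lt_trichotomy a b with h1 | h1 | h1
      · have hne : (a :: as) ≠ (b :: bs) := by
          intro e; cases e; omega
        simp [lexCmp, lexLt, hne, h1]
      · subst h1
        have : ((a :: as) ≠ (a :: bs)) = (as ≠ bs) := by simp
        simp only [lexCmp, lexLt, lt_irrefl, if_false, this]
        exact ih bs r h
      · have hne : (a :: as) ≠ (b :: bs) := by
          intro e; cases e; omega
        have h2 : ¬ a < b := by omega
        simp [lexCmp, lexLt, hne, h1, h2]

theorem less_spec' (x : List Int) (i : Int) (j : Int) (ISA : List Int)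
    (_hPre : Pre_less x i j ISA) : less x i j ISA = less_alt x i j ISA := by
  simp only [less, less_alt]
  rw [lexLt_ne _ _ _ (by simp)]
  by_cases h0 : PySem.Int.mod i 3 ≠ 0 ∧ PySem.Int.mod j 3 ≠ 0
  · -- T = 0: the rank branch fires immediately
    have hT : offsetT i j = 0 := by simp only [offsetT, if_pos h0]
    rw [mod3, mod3] at h0
    have d0a : ¬ (3:Int) ∣ i := by omega
    have d0b : ¬ (3:Int) ∣ j := by omega
    simp [hT, lessA, d0a, d0b, List.range_succ, lexCmp, padAt_eq_safeIdx]
  · by_cases h2 : PySem.Int.mod i 3 = 2 ∨ PySem.Int.mod j 3 = 2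
    · -- T = 2
      have hT : offsetT i j = 2 := by simp only [offsetT, if_neg h0, if_pos h2]
      rw [mod3, mod3] at h0 h2
      have c0 : ¬ (¬ (3:Int) ∣ i ∧ ¬ (3:Int) ∣ j) := by omega
      have c1 : ¬ (¬ (3:Int) ∣ (i + 1) ∧ ¬ (3:Int) ∣ (j + 1)) := by omega
      have d2a : ¬ (3:Int) ∣ (i + 2) := by omega
      have d2b : ¬ (3:Int) ∣ (j + 2) := by omega
      have e1 : i + 1 + 1 = i + 2 := by ring
      have e2 : j + 1 + 1 = j + 2 := by ring
      simp [hT, lessA, c0, c1, d2a, d2b, e1, e2, List.range_succ, lexCmp, padAt_eq_safeIdx]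
    · -- T = 1
      have hT : offsetT i j = 1 := by simp only [offsetT, if_neg h0, if_neg h2]
      rw [mod3, mod3] at h0 h2
      have c0 : ¬ (¬ (3:Int) ∣ i ∧ ¬ (3:Int) ∣ j) := by omega
      have d1a : ¬ (3:Int) ∣ (i + 1) := by omega
      have d1b : ¬ (3:Int) ∣ (j + 1) := by omega
      simp [hT, lessA, c0, d1a, d1b, List.range_succ, lexCmp, padAt_eq_safeIdx]

-- ===== VERDICT (by name: the statement is the Claim_ definition above) =====
theorem less_spec : Claim_equal_less := by
  intro x i j ISA _ hPre
  exact less_spec' x i j ISA hPre
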